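-- pv_equiv track=rewrite | github.com/vertiljivenson9/espejo | cerebro/red_neural.py | _clasificar_pensamiento
-- ===== SOURCE A (Python) =====
-- from typing import Dict, List, Set, Tuple, Optional
--
-- def _clasificar_pensamiento(resultado: Dict) -> str:
--     """Clasifica el tipo de pensamiento generado"""
--     conceptos = resultado["conceptos_activados"]
--
--     if any("emocion" in c.lower() for c in conceptos):
--         return "emocional"
--     elif any("habilidad" in c.lower() for c in conceptos):
--         return "practico"
--     elif any("idea" in c.lower() for c in conceptos):
--         return "conceptual"
--     else:
--         return "mixto"
-- ===== SOURCE B (Python) =====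
-- def _clasificar_pensamiento(resultado):
--     """Clasifica el tipo de pensamiento generado"""
--     has_habilidad = False
--     has_idea = False
--     for c in resultado["conceptos_activados"]:
--         lc = c.lower()
--         if "emocion" in lc:
--             return "emocional"
--         if "habilidad" in lc:
--             has_habilidad = True
--         if "idea" in lc:
--             has_idea = True
--     if has_habilidad:
--         return "practico"
--     if has_idea:
--         return "conceptual"
--     return "mixto"
-- ===== Notes on version B (the rewrite author's own statement) =====
-- stated objective: alternative
-- what changed: Three separate any() passes over the concept list are replaced by a single loop that lowercases each concept once, returns 'emocional' immediately, and records habilidad/idea flags for the final decision.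
import Mathlib
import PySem

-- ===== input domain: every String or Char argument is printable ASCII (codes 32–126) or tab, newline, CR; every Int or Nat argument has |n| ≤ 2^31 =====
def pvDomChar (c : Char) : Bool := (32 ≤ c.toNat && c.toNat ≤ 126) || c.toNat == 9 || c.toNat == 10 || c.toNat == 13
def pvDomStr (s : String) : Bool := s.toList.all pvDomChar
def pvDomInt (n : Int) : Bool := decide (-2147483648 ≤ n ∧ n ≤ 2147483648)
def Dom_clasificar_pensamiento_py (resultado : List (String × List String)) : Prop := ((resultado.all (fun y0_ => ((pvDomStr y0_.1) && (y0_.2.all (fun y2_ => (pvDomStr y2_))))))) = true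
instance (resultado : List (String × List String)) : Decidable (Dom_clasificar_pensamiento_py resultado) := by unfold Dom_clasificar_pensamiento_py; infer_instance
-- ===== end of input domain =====

-- B replaces A's three separate any() scans by one loop that lowercases each concept once,
-- returns "emocional" immediately and keeps habilidad/idea flags (objective: alternative).

-- ===== PORT A =====
def clasificar_pensamiento_py (resultado : List (String × List String)) : String :=
  let conceptos := ((PySem.Dict.mk resultado).get? "conceptos_activados").getD []
  if conceptos.any (fun c => PySem.Str.isIn "emocion" (PySem.Str.lower c)) then "emocional"
  else if conceptos.any (fun c => PySem.Str.isIn "habilidad" (PySem.Str.lower c)) then "practico"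
  else if conceptos.any (fun c => PySem.Str.isIn "idea" (PySem.Str.lower c)) then "conceptual"
  else "mixto"

-- ===== PORT B =====
def clasificarAltLoop : List String → Bool → Bool → String
  | [], hasHab, hasIdea =>
      if hasHab then "practico" else if hasIdea then "conceptual" else "mixto"
  | c :: rest, hasHab, hasIdea =>
      let lc := PySem.Str.lower c
      if PySem.Str.isIn "emocion" lc then "emocional"
      else clasificarAltLoop rest (hasHab || PySem.Str.isIn "habilidad" lc)
                                  (hasIdea || PySem.Str.isIn "idea" lc)

def clasificar_pensamiento_py_alt (resultado : List (String × List String)) : String :=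
  clasificarAltLoop (((PySem.Dict.mk resultado).get? "conceptos_activados").getD []) false false

-- ===== PRECONDITION & SPEC =====
-- Pre_ excludes exactly the inputs where the dict has no key "conceptos_activados" (Python A raises KeyError).
def Pre_clasificar_pensamiento_py (resultado : List (String × List String)) : Prop :=
  "conceptos_activados" ∈ resultado.map Prod.fst
instance (resultado : List (String × List String)) : Decidable (Pre_clasificar_pensamiento_py resultado) := by unfold Pre_clasificar_pensamiento_py; infer_instance
def pvWitness_clasificar_pensamiento_py : (List (String × List String)) := [("conceptos_activados", ["Idea nueva", "habilidad"])]
def Spec_clasificar_pensamiento_py (resultado : List (String × List String)) (out : String) : Prop := out = clasificar_pensamiento_py_alt resultado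
instance (resultado : List (String × List String)) (out : String) : Decidable (Spec_clasificar_pensamiento_py resultado out) := by unfold Spec_clasificar_pensamiento_py; infer_instance

-- ===== CLAIM (what is proved, stated in full; the proofs are below) =====
def Claim_equal_clasificar_pensamiento_py : Prop := ∀ (resultado : List (String × List String)), Dom_clasificar_pensamiento_py resultado → Pre_clasificar_pensamiento_py resultado → Spec_clasificar_pensamiento_py resultado (clasificar_pensamiento_py resultado)

-- ===== LEMMAS AND PROOFS =====
theorem clasificarAltLoop_eq (cs : List String) (hab idea : Bool) :
    clasificarAltLoop cs hab idea =
      if cs.any (fun c => PySem.Str.isIn "emocion" (PySem.Str.lower c)) then "emocional"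
      else if hab || cs.any (fun c => PySem.Str.isIn "habilidad" (PySem.Str.lower c)) then "practico"
      else if idea || cs.any (fun c => PySem.Str.isIn "idea" (PySem.Str.lower c)) then "conceptual"
      else "mixto" := by
  induction cs generalizing hab idea with
  | nil => simp [clasificarAltLoop]
  | cons c rest ih =>
      simp only [clasificarAltLoop, List.any_cons, ih]
      cases h1 : PySem.Str.isIn "emocion" (PySem.Str.lower c) <;>
        simp only [h1, Bool.true_or, Bool.false_or, if_true, Bool.or_assoc] <;> simp

-- ===== VERDICT (by name: the statement is the Claim_ definition above) =====
theorem clasificar_pensamiento_py_spec : Claim_equal_clasificar_pensamiento_py := by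
  intro resultado _ _
  unfold Spec_clasificar_pensamiento_py clasificar_pensamiento_py clasificar_pensamiento_py_alt
  rw [clasificarAltLoop_eq]
  simp
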